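-- pv_equiv track=rewrite | github.com/kamalaly611/DSA-TimeCompleixty | lambda.py | return_lis
-- ===== SOURCE A (Python) =====
-- def return_lis(l):
--     evem_sum=0
--     odd_sum=0
--     div_3=0
--     for i in l:
--         if i%2==0:
--             evem_sum=evem_sum+i
--         if i%2!=0:
--             odd_sum=odd_sum+i
--         if i%3==0:
--             div_3=div_3+i
--     return(evem_sum,odd_sum,div_3)
-- ===== SOURCE B (Python) =====
-- def return_lis(l):
--     return (sum(i for i in l if i % 2 == 0),
--             sum(i for i in l if i % 2 != 0),
--             sum(i for i in l if i % 3 == 0))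
-- ===== Notes on version B (the rewrite author's own statement) =====
-- stated objective: simpler
-- what changed: Replaces the single fused loop with three mutable accumulators by three independent filtered sum() passes, one per category.
import Mathlib
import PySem

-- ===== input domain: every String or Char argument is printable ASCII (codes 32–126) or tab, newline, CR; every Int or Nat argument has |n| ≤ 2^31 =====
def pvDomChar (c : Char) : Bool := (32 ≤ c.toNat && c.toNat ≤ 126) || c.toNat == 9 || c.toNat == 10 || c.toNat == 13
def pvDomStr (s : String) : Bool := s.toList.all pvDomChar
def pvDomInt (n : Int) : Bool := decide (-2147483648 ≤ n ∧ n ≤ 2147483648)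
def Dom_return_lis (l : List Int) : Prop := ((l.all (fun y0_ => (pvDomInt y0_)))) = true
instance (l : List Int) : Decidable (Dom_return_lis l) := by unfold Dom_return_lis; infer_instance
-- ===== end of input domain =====

-- B replaces A's single fused loop over three accumulators by three independent
-- filtered sum passes (objective: simpler).

-- ===== PORT A =====
-- one fold over the list carrying the triple (evem_sum, odd_sum, div_3)
def return_lis (l : List Int) : Int × Int × Int :=
  let s := l.foldl (fun (st : Int × Int × Int) i =>
    let st := if PySem.Int.mod i 2 = 0 then (st.1 + i, st.2.1, st.2.2) else st
    let st := if PySem.Int.mod i 2 ≠ 0 then (st.1, st.2.1 + i, st.2.2) else st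
    if PySem.Int.mod i 3 = 0 then (st.1, st.2.1, st.2.2 + i) else st)
    (0, 0, 0)
  s

-- ===== PORT B =====
-- three independent filtered passes, each summed on its own
def return_lis_alt (l : List Int) : Int × Int × Int :=
  ((l.filter (fun i => PySem.Int.mod i 2 == 0)).sum,
   (l.filter (fun i => PySem.Int.mod i 2 != 0)).sum,
   (l.filter (fun i => PySem.Int.mod i 3 == 0)).sum)

-- ===== PRECONDITION & SPEC =====
def Spec_return_lis (l : List Int) (out : Int × Int × Int) : Prop := out = return_lis_alt l
instance (l : List Int) (out : Int × Int × Int) : Decidable (Spec_return_lis l out) := by unfold Spec_return_lis; infer_instance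

-- ===== CLAIM (what is proved, stated in full; the proofs are below) =====
def Claim_equal_return_lis : Prop := ∀ (l : List Int), Dom_return_lis l → Spec_return_lis l (return_lis l)

-- ===== LEMMAS AND PROOFS =====

theorem return_lis_shift (l : List Int) (s : Int × Int × Int) :
    l.foldl (fun (st : Int × Int × Int) i =>
      let st := if PySem.Int.mod i 2 = 0 then (st.1 + i, st.2.1, st.2.2) else st
      let st := if PySem.Int.mod i 2 ≠ 0 then (st.1, st.2.1 + i, st.2.2) else st
      if PySem.Int.mod i 3 = 0 then (st.1, st.2.1, st.2.2 + i) else st) s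
    = (s.1 + (l.filter (fun i => PySem.Int.mod i 2 == 0)).sum,
       s.2.1 + (l.filter (fun i => PySem.Int.mod i 2 != 0)).sum,
       s.2.2 + (l.filter (fun i => PySem.Int.mod i 3 == 0)).sum) := by
  induction l generalizing s with
  | nil => simp
  | cons x xs ih =>
    simp only [List.foldl_cons, List.filter_cons, ih]
    rcases Int.emod_two_eq x with h2 | h2 <;> by_cases h3 : x % 3 = 0 <;>
      simp [h2, h3, Prod.ext_iff] <;> omega

theorem return_lis_spec : Claim_equal_return_lis := by
  intro l _
  unfold Spec_return_lis return_lis return_lis_alt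
  rw [return_lis_shift]
  simp
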